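-- pv_equiv track=rewrite | github.com/alrab223/odds_calc | odds_calc/betting_app/utils.py | assign_frames
-- ===== SOURCE A (Python) =====
-- def assign_frames(total):
--    groups = []
--    base = total // 8
--    rem = total % 8
--    current = 1
--    for frame in range(1, 9):
--       size = base + (1 if frame > 8 - rem else 0)
--       groups.append((frame, current, current + size - 1))
--       current += size
--    return groups
-- ===== SOURCE B (Python) =====
-- def assign_frames(total):
--    base = total // 8
--    rem = total % 8
--    groups = []
--    for frame in range(1, 9):
--       big_before = max(0, (frame - 1) - (8 - rem))
--       start = 1 + (frame - 1) * base + big_before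
--       size = base + (1 if frame > 8 - rem else 0)
--       groups.append((frame, start, start + size - 1))
--    return groups
-- ===== Notes on version B (the rewrite author's own statement) =====
-- stated objective: alternative
-- what changed: Each frame's start is computed by a direct closed form (1 + (frame-1)*base + number of earlier big frames) instead of threading a running 'current' accumulator between iterations.
import Mathlib
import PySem

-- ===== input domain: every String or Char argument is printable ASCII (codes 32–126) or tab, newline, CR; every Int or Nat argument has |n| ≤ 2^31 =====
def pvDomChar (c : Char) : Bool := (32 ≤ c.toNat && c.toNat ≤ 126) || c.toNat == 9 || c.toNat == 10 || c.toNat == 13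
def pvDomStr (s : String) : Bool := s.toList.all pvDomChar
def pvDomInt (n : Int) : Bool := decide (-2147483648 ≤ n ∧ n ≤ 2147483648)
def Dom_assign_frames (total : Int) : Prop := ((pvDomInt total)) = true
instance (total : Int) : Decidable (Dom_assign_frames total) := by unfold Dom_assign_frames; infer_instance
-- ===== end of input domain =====

-- B replaces A's running 'current' accumulator with a stateless closed form for each frame's start; alternative decomposition, same cost.
-- ===== PORT A =====
def assign_frames (total : Int) : List (Int × Int × Int) :=
  let base := PySem.Int.floordiv total 8
  let rem := PySem.Int.mod total 8
  let st := (PySem.List.pyRange 1 9 1).foldl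
    (fun (st : List (Int × Int × Int) × Int) frame =>
      let size := base + (if frame > 8 - rem then (1 : Int) else 0)
      (st.1 ++ [(frame, st.2, st.2 + size - 1)], st.2 + size))
    ([], 1)
  st.1

-- ===== PORT B =====
def assign_frames_alt (total : Int) : List (Int × Int × Int) :=
  let base := PySem.Int.floordiv total 8
  let rem := PySem.Int.mod total 8
  (PySem.List.pyRange 1 9 1).map (fun frame =>
    let big_before := max 0 ((frame - 1) - (8 - rem))
    let start := 1 + (frame - 1) * base + big_before
    let size := base + (if frame > 8 - rem then (1 : Int) else 0)
    (frame, start, start + size - 1))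

-- ===== PRECONDITION & SPEC =====
def Spec_assign_frames (total : Int) (out : List (Int × Int × Int)) : Prop := out = assign_frames_alt total
instance (total : Int) (out : List (Int × Int × Int)) : Decidable (Spec_assign_frames total out) := by unfold Spec_assign_frames; infer_instance

-- ===== CLAIM (what is proved, stated in full; the proofs are below) =====
def Claim_equal_assign_frames : Prop := ∀ (total : Int), Dom_assign_frames total → Spec_assign_frames total (assign_frames total)

-- ===== LEMMAS AND PROOFS =====

-- ===== VERDICT (by name: the statement is the Claim_ definition above) =====
theorem assign_frames_spec : Claim_equal_assign_frames := by
  intro total _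
  unfold Spec_assign_frames assign_frames assign_frames_alt
  have h0 : (0:Int) < 8 := by norm_num
  have hr0 := PySem.Int.mod_nonneg total h0
  have hr8 := PySem.Int.mod_lt total h0
  have hrange : PySem.List.pyRange 1 9 1 = [1,2,3,4,5,6,7,8] := by
    rw [PySem.List.pyRange_one_cons (by norm_num), PySem.List.pyRange_one_cons (by norm_num),
      PySem.List.pyRange_one_cons (by norm_num), PySem.List.pyRange_one_cons (by norm_num),
      PySem.List.pyRange_one_cons (by norm_num), PySem.List.pyRange_one_cons (by norm_num),
      PySem.List.pyRange_one_cons (by norm_num), PySem.List.pyRange_one_cons (by norm_num),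
      PySem.List.pyRange_one_eq_nil (by norm_num)]
    norm_num
  rw [hrange]
  simp only [List.foldl, List.map, List.cons.injEq, Prod.mk.injEq, List.cons_append,
    List.nil_append]
  generalize PySem.Int.mod total 8 = r at hr0 hr8 ⊢
  generalize PySem.Int.floordiv total 8 = b
  interval_cases r <;> norm_num [max_def] <;> omega
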